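-- pv_equiv track=rewrite | github.com/pmvkirock/leetcode | xyz.py | sss
-- ===== SOURCE A (Python) =====
-- def sss(m,n,quries):
--     a = []
--     ans = []
--     for i in range(n):
--         b = []
--         for j in range(m):
--             b.append((i+1) * (j+1))
--         a.append(b)
--
--     for x in quries:
--         if x[0] == 0:
--             ans.append(min([min(r) for r in a]))
--         elif x[0]== 1:
--             for i in range(len(a[x[1]-1])):
--                 a[x[1]-1][i] = (n+n)*(m+m)
--         elif x[0] == 2:
--             for i in range(len(a)):
--                 a[i][x[1]-1] = (n+n)*(m+m)
--
--     return ans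
-- ===== SOURCE B (Python) =====
-- def sss(m, n, quries):
--     # Lazy approach: never build the n*m matrix.  Remember which 1-based
--     # rows/columns have been overwritten with the big value; the current
--     # minimum is (first untouched row)*(first untouched column), or the
--     # big value once every row or every column is overwritten.
--     big = (n + n) * (m + m)
--     rows_done = set()
--     cols_done = set()
--     next_row = 0
--     next_col = 0
--     ans = []
--     for x in quries:
--         op = x[0]
--         if op == 0:
--             while next_row in rows_done:
--                 next_row += 1
--             while next_col in cols_done:
--                 next_col += 1
--             if next_row < n and next_col < m:
--                 ans.append((next_row + 1) * (next_col + 1))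
--             else:
--                 ans.append(big)
--         elif op == 1:
--             rows_done.add(x[1] - 1)
--         elif op == 2:
--             cols_done.add(x[1] - 1)
--     return ans
-- ===== Notes on version B (the rewrite author's own statement) =====
-- stated objective: faster
-- what changed: B never materialises the n*m matrix: it keeps sets of overwritten rows/columns plus lazy pointers to the first untouched row/column, so each query is O(1) amortised instead of an O(n*m) or O(n)/O(m) pass; Pre_ restricts to the task's natural domain of 1-based in-range query indices, excluding set queries with a missing, zero or negative index field (A's negative-index wraparound there is accidental) and min queries on an empty matrix (A raises there).
-- outside the precondition, e.g. on sss(2, 1, [[1, 0], [0]]): A returns [8], B returns [1]; on sss(1, 2, [[2, 0], [0]]): A returns [8], B returns [1]; on sss(2, 0, [[2]]): A returns [], B raises IndexError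
import Mathlib
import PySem

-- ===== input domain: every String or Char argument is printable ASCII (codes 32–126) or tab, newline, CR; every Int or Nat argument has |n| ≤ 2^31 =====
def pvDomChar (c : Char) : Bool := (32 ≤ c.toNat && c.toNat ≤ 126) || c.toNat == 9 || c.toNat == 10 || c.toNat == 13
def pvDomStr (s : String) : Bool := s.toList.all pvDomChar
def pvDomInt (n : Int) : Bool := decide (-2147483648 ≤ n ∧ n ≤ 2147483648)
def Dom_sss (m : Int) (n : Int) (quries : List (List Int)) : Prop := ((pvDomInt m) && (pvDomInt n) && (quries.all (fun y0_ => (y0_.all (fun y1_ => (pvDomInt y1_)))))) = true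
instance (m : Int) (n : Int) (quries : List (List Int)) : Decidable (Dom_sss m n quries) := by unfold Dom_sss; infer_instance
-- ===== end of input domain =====

-- B replaces A's explicit n*m matrix by sets of overwritten rows/columns with lazy
-- pointers to the first untouched row/column (objective: faster).

-- ===== PORT A =====
-- loop body of A's query loop, kept as a named helper for the proofs
def sssStepA (m : Int) (n : Int) (st : List (List Int) × List Int) (x : List Int) :
    List (List Int) × List Int :=
  if PySem.List.pyGetD x 0 0 = 0 then
    (st.1, st.2 ++ [(PySem.List.min? (st.1.map (fun r => (PySem.List.min? r (fun y => y)).getD 0)) (fun y => y)).getD 0])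
  else if PySem.List.pyGetD x 0 0 = 1 then
    (PySem.List.pySetD st.1 (PySem.List.pyGetD x 1 0 - 1)
      ((PySem.List.pyGetD st.1 (PySem.List.pyGetD x 1 0 - 1) []).map (fun _ => (n+n)*(m+m))), st.2)
  else if PySem.List.pyGetD x 0 0 = 2 then
    (st.1.map (fun r => PySem.List.pySetD r (PySem.List.pyGetD x 1 0 - 1) ((n+n)*(m+m))), st.2)
  else st

def sss (m : Int) (n : Int) (quries : List (List Int)) : List Int :=
  let a : List (List Int) :=
    (PySem.List.pyRange 0 n).foldl
      (fun a i => a ++ [(PySem.List.pyRange 0 m).foldl (fun b j => b ++ [(i+1)*(j+1)]) []]) []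
  (quries.foldl (sssStepA m n) (a, [])).2

-- ===== PORT B =====
-- 'while k in s: k += 1'; the fuel (set size at the call site) only makes it total
def sssAdvance (s : PySem.Set Int) (k : Int) : Nat → Int
  | 0 => k
  | f+1 => if PySem.Set.contains s k then sssAdvance s (k+1) f else k

-- loop body of B's query loop; state = (rows_done, cols_done, next_row, next_col, ans)
def sssStepB (m : Int) (n : Int)
    (st : PySem.Set Int × PySem.Set Int × Int × Int × List Int) (x : List Int) :
    PySem.Set Int × PySem.Set Int × Int × Int × List Int :=
  let op := PySem.List.pyGetD x 0 0
  if op = 0 then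
    let nr := sssAdvance st.1 st.2.2.1 st.1.length
    let nc := sssAdvance st.2.1 st.2.2.2.1 st.2.1.length
    (st.1, st.2.1, nr, nc,
      st.2.2.2.2 ++ [if nr < n ∧ nc < m then (nr+1)*(nc+1) else (n+n)*(m+m)])
  else if op = 1 then
    (PySem.Set.add st.1 (PySem.List.pyGetD x 1 0 - 1),
      st.2.1, st.2.2.1, st.2.2.2.1, st.2.2.2.2)
  else if op = 2 then
    (st.1, PySem.Set.add st.2.1 (PySem.List.pyGetD x 1 0 - 1),
      st.2.2.1, st.2.2.2.1, st.2.2.2.2)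
  else st

def sss_alt (m : Int) (n : Int) (quries : List (List Int)) : List Int :=
  (quries.foldl (sssStepB m n) (PySem.Set.empty, PySem.Set.empty, 0, 0, [])).2.2.2.2

-- ===== PRECONDITION & SPEC =====
-- Pre_sss restricts to the task's natural domain of 1-based in-range query indices:
-- it excludes set queries with a missing, zero or negative index field (on which
-- A either raises IndexError or silently wraps to the matrix's other end — an
-- accident of Python's negative indexing) and min queries on an empty matrix
-- (on which A's min([]) raises ValueError); a column set on a matrix with no rows
-- still needs its index field present because B reads it.
def Pre_sss (m : Int) (n : Int) (quries : List (List Int)) : Prop :=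
  ∀ x ∈ quries, x ≠ [] ∧
    (x.headI = 0 → 1 ≤ n ∧ 1 ≤ m) ∧
    (x.headI = 1 → 2 ≤ x.length ∧ 1 ≤ x.getD 1 0 ∧ x.getD 1 0 ≤ n) ∧
    (x.headI = 2 → 2 ≤ x.length ∧ (n = 0 ∨ (1 ≤ x.getD 1 0 ∧ x.getD 1 0 ≤ m)))
instance (m : Int) (n : Int) (quries : List (List Int)) : Decidable (Pre_sss m n quries) := by
  unfold Pre_sss; infer_instance

def pvWitness_sss : Int × Int × List (List Int) := (3, 2, [[1, 1], [0], [2, 3], [0]])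

def Spec_sss (m : Int) (n : Int) (quries : List (List Int)) (out : List Int) : Prop :=
  out = sss_alt m n quries
instance (m : Int) (n : Int) (quries : List (List Int)) (out : List Int) : Decidable (Spec_sss m n quries out) := by
  unfold Spec_sss; infer_instance

-- ===== CLAIM (what is proved, stated in full; the proofs are below) =====
def Claim_equal_sss : Prop := ∀ (m : Int) (n : Int) (quries : List (List Int)),
  Dom_sss m n quries → Pre_sss m n quries → Spec_sss m n quries (sss m n quries)

-- ===== LEMMAS AND PROOFS =====

-- the value of A's matrix after overwriting the rows in `rows` and the columns in `cols`
def sssMat (m : Int) (n : Int) (rows : List Int) (cols : List Int) : List (List Int) :=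
  (PySem.List.pyRange 0 n).map (fun i =>
    (PySem.List.pyRange 0 m).map (fun j =>
      if i ∈ rows ∨ j ∈ cols then (n+n)*(m+m) else (i+1)*(j+1)))

-- one query's validity (the body of Pre_sss)
def sssPreQ (m : Int) (n : Int) (x : List Int) : Prop :=
  x ≠ [] ∧
    (x.headI = 0 → 1 ≤ n ∧ 1 ≤ m) ∧
    (x.headI = 1 → 2 ≤ x.length ∧ 1 ≤ x.getD 1 0 ∧ x.getD 1 0 ≤ n) ∧
    (x.headI = 2 → 2 ≤ x.length ∧ (n = 0 ∨ (1 ≤ x.getD 1 0 ∧ x.getD 1 0 ≤ m)))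

-- coupling invariant between A's state (the matrix) and B's state
def sssInv (m : Int) (n : Int) (a : List (List Int)) (rows cols : PySem.Set Int)
    (nr nc : Int) : Prop :=
  a = sssMat m n rows cols ∧ rows.Nodup ∧ cols.Nodup ∧ 0 ≤ nr ∧ 0 ≤ nc ∧
    (∀ t : Int, 0 ≤ t → t < nr → t ∈ rows) ∧ (∀ t : Int, 0 ≤ t → t < nc → t ∈ cols)

theorem sss_filter_count (s : List Int) (k : Int) :
    ((s.filter (fun x => decide (k ≤ x))).length)
      = ((s.filter (fun x => decide (k < x))).length) + s.count k := by
  induction s with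
  | nil => simp
  | cons a t ih =>
    simp only [List.filter_cons, List.count_cons]
    by_cases h1 : k ≤ a <;> by_cases h2 : k < a <;>
      simp [h1, h2, show (a == k) = decide (a = k) from rfl] <;> split_ifs <;> omega

theorem sss_filter_succ (s : List Int) (k : Int) (hnd : s.Nodup) (hk : k ∈ s) :
    ((s.filter (fun x => decide (k+1 ≤ x))).length) < ((s.filter (fun x => decide (k ≤ x))).length) := by
  have hp : (fun x : Int => decide (k+1 ≤ x)) = (fun x : Int => decide (k < x)) := by
    funext x; simp only [decide_eq_decide]; omega
  rw [hp, sss_filter_count s k, List.count_eq_one_of_mem hnd hk]; omega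

theorem sssAdvance_spec : ∀ (f : Nat) (s : List Int) (k : Int), s.Nodup →
    (s.filter (fun x => decide (k ≤ x))).length ≤ f →
    sssAdvance s k f ∉ s ∧ k ≤ sssAdvance s k f ∧
      (∀ t : Int, k ≤ t → t < sssAdvance s k f → t ∈ s) := by
  intro f
  induction f with
  | zero =>
    intro s k _ hle
    simp only [sssAdvance]
    have hk : k ∉ s := by
      intro hk
      have : k ∈ s.filter (fun x => decide (k ≤ x)) := by
        simp [List.mem_filter, hk]
      have := List.length_pos_of_mem this; omega
    exact ⟨hk, le_refl k, fun t h1 h2 => absurd (lt_of_le_of_lt h1 h2) (lt_irrefl k)⟩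
  | succ f ih =>
    intro s k hnd hle
    simp only [sssAdvance]
    by_cases hc : PySem.Set.contains s k
    · have hk : k ∈ s := by simpa [PySem.Set.contains, List.contains_iff_mem] using hc
      rw [if_pos hc]
      have hle' : (s.filter (fun x => decide (k+1 ≤ x))).length ≤ f := by
        have := sss_filter_succ s k hnd hk; omega
      obtain ⟨h1, h2, h3⟩ := ih s (k+1) hnd hle'
      refine ⟨h1, by omega, fun t ht1 ht2 => ?_⟩
      rcases eq_or_lt_of_le ht1 with h | h
      · exact h ▸ hk
      · exact h3 t (by omega) ht2
    · rw [if_neg hc]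
      have hk : k ∉ s := by simpa [PySem.Set.contains, List.contains_iff_mem] using hc
      exact ⟨hk, le_refl k, fun t h1 h2 => absurd (lt_of_le_of_lt h1 h2) (lt_irrefl k)⟩

theorem sss_foldl_min_spec : ∀ (t : List Int) (a : Int),
    t.foldl min a ∈ a :: t ∧ ∀ y ∈ a :: t, t.foldl min a ≤ y := by
  intro t
  induction t with
  | nil => intro a; simp
  | cons b t ih =>
    intro a
    simp only [List.foldl_cons]
    obtain ⟨h1, h2⟩ := ih (min a b)
    constructor
    · rcases List.mem_cons.mp h1 with h | h
      · rcases min_choice a b with hm | hm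
        · simp only [List.mem_cons]; exact Or.inl (h.trans hm)
        · simp only [List.mem_cons]; exact Or.inr (Or.inl (h.trans hm))
      · simp only [List.mem_cons]; exact Or.inr (Or.inr h)
    · intro y hy
      rcases List.mem_cons.mp hy with h | hy
      · rw [h]; exact le_trans (h2 _ List.mem_cons_self) (min_le_left a b)
      rcases List.mem_cons.mp hy with h | hy
      · rw [h]; exact le_trans (h2 _ List.mem_cons_self) (min_le_right a b)
      · exact h2 y (List.mem_cons_of_mem _ hy)

theorem sss_min?_eq (l : List Int) (v : Int) (hm : v ∈ l) (hle : ∀ y ∈ l, v ≤ y) :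
    PySem.List.min? l (fun y => y) = some v := by
  cases l with
  | nil => cases hm
  | cons a t =>
    rw [PySem.List.min?_id_cons]
    obtain ⟨h1, h2⟩ := sss_foldl_min_spec t a
    exact congrArg some (le_antisymm (h2 v hm) (hle _ h1))

theorem sss_idx (len : Nat) (y : Int) (d : Int) (hd : 0 < d) (hlen : len = d.toNat)
    (h1 : 1 ≤ y) (h2 : y ≤ d) :
    PySem.List.pyIdx? len (y - 1) = some (y - 1).toNat := by
  unfold PySem.List.pyIdx?
  split_ifs <;> first | rfl | omega | (simp only [Option.some.injEq]; omega)

theorem sss_row_min (m n : Int) (rows cols : List Int) (nc i : Int)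
    (hm : 1 ≤ m) (hn : 1 ≤ n) (hi0 : 0 ≤ i) (hin : i < n) (hnc0 : 0 ≤ nc)
    (hncm : nc ∉ cols) (hb : ∀ t : Int, 0 ≤ t → t < nc → t ∈ cols) :
    (PySem.List.min? ((PySem.List.pyRange 0 m).map (fun j =>
        if i ∈ rows ∨ j ∈ cols then (n+n)*(m+m) else (i+1)*(j+1))) (fun y => y)).getD 0
      = if i ∈ rows ∨ m ≤ nc then (n+n)*(m+m) else (i+1)*(nc+1) := by
  by_cases hbig : i ∈ rows ∨ m ≤ nc
  · rw [if_pos hbig]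
    have hmem : (n+n)*(m+m) ∈ (PySem.List.pyRange 0 m).map (fun j =>
        if i ∈ rows ∨ j ∈ cols then (n+n)*(m+m) else (i+1)*(j+1)) := by
      refine List.mem_map.mpr ⟨0, PySem.List.mem_pyRange_one.mpr ⟨le_refl 0, by omega⟩, ?_⟩
      rcases hbig with h | h
      · simp [h]
      · have h0 : (0:Int) ∈ cols := hb 0 (le_refl 0) (by omega)
        simp [h0]
    have hle : ∀ y ∈ (PySem.List.pyRange 0 m).map (fun j =>
        if i ∈ rows ∨ j ∈ cols then (n+n)*(m+m) else (i+1)*(j+1)), (n+n)*(m+m) ≤ y := by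
      intro yv hy
      obtain ⟨j, hj, rfl⟩ := List.mem_map.mp hy
      have hjr := PySem.List.mem_pyRange_one.mp hj
      rcases hbig with h | h
      · simp [h]
      · have hjc : j ∈ cols := hb j hjr.1 (by omega)
        simp [hjc]
    rw [sss_min?_eq _ _ hmem hle]
    rfl
  · push_neg at hbig
    obtain ⟨hir, hncm'⟩ := hbig
    rw [if_neg (by push_neg; exact ⟨hir, hncm'⟩)]
    have hmem : (i+1)*(nc+1) ∈ (PySem.List.pyRange 0 m).map (fun j =>
        if i ∈ rows ∨ j ∈ cols then (n+n)*(m+m) else (i+1)*(j+1)) := by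
      refine List.mem_map.mpr ⟨nc, PySem.List.mem_pyRange_one.mpr ⟨hnc0, by omega⟩, ?_⟩
      simp [hir, hncm]
    have hle : ∀ y ∈ (PySem.List.pyRange 0 m).map (fun j =>
        if i ∈ rows ∨ j ∈ cols then (n+n)*(m+m) else (i+1)*(j+1)), (i+1)*(nc+1) ≤ y := by
      intro yv hy
      obtain ⟨j, hj, rfl⟩ := List.mem_map.mp hy
      have hjr := PySem.List.mem_pyRange_one.mp hj
      by_cases hjc : j ∈ cols
      · simp only [hjc, or_true, if_true]
        nlinarith [hjr.1, hjr.2]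
      · have hjge : nc ≤ j := by
          by_contra hlt
          push_neg at hlt
          exact hjc (hb j hjr.1 hlt)
        simp only [hir, hjc, or_self, if_false]
        nlinarith [hjr.1]
    rw [sss_min?_eq _ _ hmem hle]
    rfl

theorem sss_mat_min (m n : Int) (rows cols : List Int) (nr nc : Int)
    (hm : 1 ≤ m) (hn : 1 ≤ n) (h0r : 0 ≤ nr) (h0c : 0 ≤ nc)
    (hrm : nr ∉ rows) (hrb : ∀ t : Int, 0 ≤ t → t < nr → t ∈ rows)
    (hcm : nc ∉ cols) (hcb : ∀ t : Int, 0 ≤ t → t < nc → t ∈ cols) :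
    (PySem.List.min? ((sssMat m n rows cols).map
        (fun r => (PySem.List.min? r (fun y => y)).getD 0)) (fun y => y)).getD 0
      = if nr < n ∧ nc < m then (nr+1)*(nc+1) else (n+n)*(m+m) := by
  have hrows : (sssMat m n rows cols).map (fun r => (PySem.List.min? r (fun y => y)).getD 0)
      = (PySem.List.pyRange 0 n).map (fun i =>
          if i ∈ rows ∨ m ≤ nc then (n+n)*(m+m) else (i+1)*(nc+1)) := by
    rw [sssMat, List.map_map]
    refine List.map_congr_left (fun i hi => ?_)
    have h := PySem.List.mem_pyRange_one.mp hi
    exact sss_row_min m n rows cols nc i hm hn h.1 h.2 h0c hcm hcb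
  rw [hrows]
  by_cases hc : nr < n ∧ nc < m
  · rw [if_pos hc]
    have hmem : (nr+1)*(nc+1) ∈ (PySem.List.pyRange 0 n).map (fun i =>
        if i ∈ rows ∨ m ≤ nc then (n+n)*(m+m) else (i+1)*(nc+1)) := by
      refine List.mem_map.mpr ⟨nr, PySem.List.mem_pyRange_one.mpr ⟨h0r, hc.1⟩, ?_⟩
      have : ¬ (m ≤ nc) := by omega
      simp [hrm, this]
    have hle : ∀ y ∈ (PySem.List.pyRange 0 n).map (fun i =>
        if i ∈ rows ∨ m ≤ nc then (n+n)*(m+m) else (i+1)*(nc+1)), (nr+1)*(nc+1) ≤ y := by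
      intro yv hy
      obtain ⟨i, hi, rfl⟩ := List.mem_map.mp hy
      have hir := PySem.List.mem_pyRange_one.mp hi
      by_cases hmem2 : i ∈ rows ∨ m ≤ nc
      · rw [if_pos hmem2]
        nlinarith [hc.1, hc.2]
      · rw [if_neg hmem2]
        push_neg at hmem2
        have hge : nr ≤ i := by
          by_contra hlt
          push_neg at hlt
          exact hmem2.1 (hrb i hir.1 hlt)
        nlinarith [hir.1]
    rw [sss_min?_eq _ _ hmem hle]
    rfl
  · rw [if_neg hc]
    have hall : ∀ i : Int, 0 ≤ i → i < n →
        (if i ∈ rows ∨ m ≤ nc then (n+n)*(m+m) else (i+1)*(nc+1)) = (n+n)*(m+m) := by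
      intro i hi1 hi2
      rcases not_and_or.mp hc with h | h
      · push_neg at h
        exact if_pos (Or.inl (hrb i hi1 (by omega)))
      · push_neg at h
        exact if_pos (Or.inr h)
    have hmem : (n+n)*(m+m) ∈ (PySem.List.pyRange 0 n).map (fun i =>
        if i ∈ rows ∨ m ≤ nc then (n+n)*(m+m) else (i+1)*(nc+1)) := by
      refine List.mem_map.mpr ⟨0, PySem.List.mem_pyRange_one.mpr ⟨le_refl 0, by omega⟩, ?_⟩
      exact hall 0 (le_refl 0) (by omega)
    have hle : ∀ y ∈ (PySem.List.pyRange 0 n).map (fun i =>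
        if i ∈ rows ∨ m ≤ nc then (n+n)*(m+m) else (i+1)*(nc+1)), (n+n)*(m+m) ≤ y := by
      intro yv hy
      obtain ⟨i, hi, rfl⟩ := List.mem_map.mp hy
      have hir := PySem.List.mem_pyRange_one.mp hi
      rw [hall i hir.1 hir.2]
    rw [sss_min?_eq _ _ hmem hle]
    rfl

theorem sss_pyGetD_one (a b : Int) (l : List Int) :
    PySem.List.pyGetD (a :: b :: l) 1 0 = b := by
  simp [PySem.List.pyGetD, PySem.List.pyGet?, PySem.List.pyIdx?]

theorem sss_row_update (m n : Int) (rows cols : List Int) (y : Int)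
    (hn : 1 ≤ n) (h1 : 1 ≤ y) (h2 : y ≤ n) :
    PySem.List.pySetD (sssMat m n rows cols) (y-1)
        ((PySem.List.pyGetD (sssMat m n rows cols) (y-1) []).map (fun _ => (n+n)*(m+m)))
      = sssMat m n (PySem.Set.add rows (y-1)) cols := by
  have hlen : (sssMat m n rows cols).length = n.toNat := by
    simp [sssMat, PySem.List.length_pyRange_one]
  have hidx : PySem.List.pyIdx? (sssMat m n rows cols).length (y-1)
      = some (y-1).toNat := sss_idx _ y n (by omega) hlen h1 h2
  have hrlt : (y-1).toNat < (sssMat m n rows cols).length := by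
    rw [hlen]; omega
  have hset : ∀ v : List Int, PySem.List.pySetD (sssMat m n rows cols) (y-1) v
      = (sssMat m n rows cols).set (y-1).toNat v := by
    intro v
    simp [PySem.List.pySetD, PySem.List.pySet?, hidx]
  have hget : PySem.List.pyGetD (sssMat m n rows cols) (y-1) []
      = (sssMat m n rows cols)[(y-1).toNat] := by
    simp only [PySem.List.pyGetD, PySem.List.pyGet?, hidx, Option.bind_some,
      List.getElem?_eq_getElem hrlt, Option.getD_some]
  have hAk : ∀ (k : Nat) (h : k < (sssMat m n rows cols).length), (sssMat m n rows cols)[k]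
      = (PySem.List.pyRange 0 m).map (fun j =>
          if (k : Int) ∈ rows ∨ j ∈ cols then (n+n)*(m+m) else ((k : Int)+1)*(j+1)) := by
    intro k h
    simp only [sssMat, List.getElem_map, PySem.List.getElem_pyRange_one, zero_add]
  have hBk : ∀ (k : Nat) (h : k < (sssMat m n (PySem.Set.add rows (y-1)) cols).length),
      (sssMat m n (PySem.Set.add rows (y-1)) cols)[k]
      = (PySem.List.pyRange 0 m).map (fun j =>
          if (k : Int) ∈ PySem.Set.add rows (y-1) ∨ j ∈ cols
          then (n+n)*(m+m) else ((k : Int)+1)*(j+1)) := by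
    intro k h
    simp only [sssMat, List.getElem_map, PySem.List.getElem_pyRange_one, zero_add]
  have hlen2 : (sssMat m n (PySem.Set.add rows (y-1)) cols).length = n.toNat := by
    simp [sssMat, PySem.List.length_pyRange_one]
  rw [hset, hget]
  apply List.ext_getElem
  · simp [sssMat, PySem.List.length_pyRange_one]
  · intro k hk1 hk2
    have hkn : k < n.toNat := by rw [hlen2] at hk2; exact hk2
    rw [List.getElem_set, hBk k hk2]
    by_cases hk : (y-1).toNat = k
    · rw [if_pos hk, hAk _ hrlt, List.map_map]
      refine List.map_congr_left (fun j _ => ?_)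
      have hkr : (k : Int) = y-1 := by omega
      have hmem : (k : Int) ∈ PySem.Set.add rows (y-1) :=
        (PySem.Set.mem_add _ _ _).mpr (Or.inr hkr)
      exact (if_pos (Or.inl hmem)).symm
    · rw [if_neg hk, hAk k (by rw [hlen]; exact hkn)]
      refine List.map_congr_left (fun j _ => ?_)
      have hmem : ((k : Int) ∈ PySem.Set.add rows (y-1)) ↔ (k : Int) ∈ rows := by
        rw [PySem.Set.mem_add]
        constructor
        · rintro (h | h)
          · exact h
          · exfalso; omega
        · exact Or.inl
      by_cases hc : (k : Int) ∈ rows ∨ j ∈ cols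
      · rw [if_pos hc, if_pos (by rw [hmem]; exact hc)]
      · rw [if_neg hc, if_neg (by rw [hmem]; exact hc)]

theorem sss_col_update (m n : Int) (rows cols : List Int) (y : Int)
    (hm : 1 ≤ m) (h1 : 1 ≤ y) (h2 : y ≤ m) :
    (sssMat m n rows cols).map (fun r => PySem.List.pySetD r (y-1) ((n+n)*(m+m)))
      = sssMat m n rows (PySem.Set.add cols (y-1)) := by
  have hidx : PySem.List.pyIdx? m.toNat (y-1) = some (y-1).toNat :=
    sss_idx m.toNat y m (by omega) rfl h1 h2
  simp only [sssMat, List.map_map]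
  refine List.map_congr_left (fun i _ => ?_)
  show PySem.List.pySetD _ (y-1) _ = _
  have hset : PySem.List.pySetD ((PySem.List.pyRange 0 m).map (fun j =>
      if i ∈ rows ∨ j ∈ cols then (n+n)*(m+m) else (i+1)*(j+1))) (y-1) ((n+n)*(m+m))
      = ((PySem.List.pyRange 0 m).map (fun j =>
          if i ∈ rows ∨ j ∈ cols then (n+n)*(m+m) else (i+1)*(j+1))).set
            (y-1).toNat ((n+n)*(m+m)) := by
    simp [PySem.List.pySetD, PySem.List.pySet?, PySem.List.length_pyRange_one, hidx]
  rw [hset]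
  apply List.ext_getElem
  · simp [PySem.List.length_pyRange_one]
  · intro j hj1 hj2
    have hjm : j < m.toNat := by
      simpa [PySem.List.length_pyRange_one] using hj2
    rw [List.getElem_set]
    simp only [List.getElem_map, PySem.List.getElem_pyRange_one, zero_add]
    by_cases hj : (y-1).toNat = j
    · rw [if_pos hj]
      have hjc : (j : Int) = y-1 := by omega
      have hmem : (j : Int) ∈ PySem.Set.add cols (y-1) :=
        (PySem.Set.mem_add _ _ _).mpr (Or.inr hjc)
      exact (if_pos (Or.inr hmem)).symm
    · rw [if_neg hj]
      have hmem : ((j : Int) ∈ PySem.Set.add cols (y-1)) ↔ (j : Int) ∈ cols := by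
        rw [PySem.Set.mem_add]
        constructor
        · rintro (h | h)
          · exact h
          · exfalso; omega
        · exact Or.inl
      by_cases hcnd : i ∈ rows ∨ (j : Int) ∈ cols
      · refine (if_pos hcnd).trans (if_pos ?_).symm
        rcases hcnd with h | h
        · exact Or.inl h
        · exact Or.inr (hmem.mpr h)
      · refine (if_neg hcnd).trans (if_neg ?_).symm
        rintro (h | h)
        · exact hcnd (Or.inl h)
        · exact hcnd (Or.inr (hmem.mp h))

theorem sss_init (m n : Int) :
    (PySem.List.pyRange 0 n).foldl
        (fun a i => a ++ [(PySem.List.pyRange 0 m).foldl (fun b j => b ++ [(i+1)*(j+1)]) []]) []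
      = sssMat m n [] [] := by
  simp only [PySem.List.foldl_append_singleton_eq_map, List.nil_append]
  simp [sssMat]

theorem sss_loop (m n : Int) : ∀ (qs : List (List Int)) (a : List (List Int))
    (rows cols : PySem.Set Int) (nr nc : Int) (ans : List Int),
    (∀ x ∈ qs, sssPreQ m n x) → sssInv m n a rows cols nr nc →
    (qs.foldl (sssStepA m n) (a, ans)).2
      = (qs.foldl (sssStepB m n) (rows, cols, nr, nc, ans)).2.2.2.2 := by
  intro qs
  induction qs with
  | nil => intro a rows cols nr nc ans _ _; rfl
  | cons x qs ih =>
    intro a rows cols nr nc ans hq hinv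
    obtain ⟨hA, hndr, hndc, h0r, h0c, hbr, hbc⟩ := hinv
    have hx := hq x List.mem_cons_self
    unfold sssPreQ at hx
    obtain ⟨hne, hp0, hp1, hp2⟩ := hx
    have hq' : ∀ z ∈ qs, sssPreQ m n z := fun z hz => hq z (List.mem_cons_of_mem x hz)
    obtain ⟨op, rest, rfl⟩ : ∃ op rest, x = op :: rest := by
      cases x with
      | nil => exact absurd rfl hne
      | cons op rest => exact ⟨op, rest, rfl⟩
    have hop : PySem.List.pyGetD (op :: rest) 0 0 = op := PySem.List.pyGetD_zero_cons _ _ _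
    have hhead : (op :: rest).headI = op := rfl
    simp only [List.foldl_cons]
    by_cases h0 : op = 0
    · obtain ⟨hn1, hm1⟩ := hp0 (hhead.trans h0)
      obtain ⟨hrm', hrle, hrmid⟩ :=
        sssAdvance_spec rows.length rows nr hndr (List.length_filter_le _ _)
      obtain ⟨hcm', hcle, hcmid⟩ :=
        sssAdvance_spec cols.length cols nc hndc (List.length_filter_le _ _)
      have hrb' : ∀ t : Int, 0 ≤ t → t < sssAdvance rows nr rows.length → t ∈ rows :=
        fun t ht1 ht2 => if h : t < nr then hbr t ht1 h else hrmid t (by omega) ht2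
      have hcb' : ∀ t : Int, 0 ≤ t → t < sssAdvance cols nc cols.length → t ∈ cols :=
        fun t ht1 ht2 => if h : t < nc then hbc t ht1 h else hcmid t (by omega) ht2
      have hsA : sssStepA m n (a, ans) (op :: rest) = (a, ans ++
          [if sssAdvance rows nr rows.length < n ∧ sssAdvance cols nc cols.length < m
            then (sssAdvance rows nr rows.length + 1) * (sssAdvance cols nc cols.length + 1)
            else (n+n)*(m+m)]) := by
        unfold sssStepA
        rw [hop, if_pos h0, hA]
        rw [sss_mat_min m n rows cols (sssAdvance rows nr rows.length)
          (sssAdvance cols nc cols.length) hm1 hn1 (le_trans h0r hrle) (le_trans h0c hcle)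
          hrm' hrb' hcm' hcb']
      have hsB : sssStepB m n (rows, cols, nr, nc, ans) (op :: rest)
          = (rows, cols, sssAdvance rows nr rows.length, sssAdvance cols nc cols.length, ans ++
            [if sssAdvance rows nr rows.length < n ∧ sssAdvance cols nc cols.length < m
              then (sssAdvance rows nr rows.length + 1) * (sssAdvance cols nc cols.length + 1)
              else (n+n)*(m+m)]) := by
        unfold sssStepB
        rw [hop, if_pos h0]
      rw [hsA, hsB]
      refine ih a rows cols _ _ _ hq' ⟨hA, hndr, hndc, le_trans h0r hrle, le_trans h0c hcle,
        hrb', hcb'⟩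
    · by_cases h1 : op = 1
      · obtain ⟨hlen2, hb1, hb2⟩ := hp1 (hhead.trans h1)
        obtain ⟨yv, rest', rfl⟩ : ∃ yv rest', rest = yv :: rest' := by
          cases rest with
          | nil => simp at hlen2
          | cons yv rest' => exact ⟨yv, rest', rfl⟩
        have hget1 : PySem.List.pyGetD (op :: yv :: rest') 1 0 = yv := sss_pyGetD_one _ _ _
        have hyd : (op :: yv :: rest').getD 1 0 = yv := rfl
        rw [hyd] at hb1 hb2
        have hn1 : 1 ≤ n := by omega
        have hsA : sssStepA m n (a, ans) (op :: yv :: rest')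
            = (sssMat m n (PySem.Set.add rows (yv-1)) cols, ans) := by
          unfold sssStepA
          rw [hop, if_neg (by rw [h1]; norm_num), if_pos h1, hget1, hA,
            sss_row_update m n rows cols yv hn1 hb1 hb2]
        have hsB : sssStepB m n (rows, cols, nr, nc, ans) (op :: yv :: rest')
            = (PySem.Set.add rows (yv-1), cols, nr, nc, ans) := by
          unfold sssStepB
          rw [hop, if_neg (by rw [h1]; norm_num), if_pos h1, hget1]
        rw [hsA, hsB]
        refine ih _ _ _ _ _ _ hq' ⟨rfl, PySem.Set.nodup_add rows _ hndr, hndc, h0r, h0c,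
          fun t ht1 ht2 => (PySem.Set.mem_add _ _ _).mpr (Or.inl (hbr t ht1 ht2)), hbc⟩
      · by_cases h2 : op = 2
        · obtain ⟨hlen2, hrange⟩ := hp2 (hhead.trans h2)
          obtain ⟨yv, rest', rfl⟩ : ∃ yv rest', rest = yv :: rest' := by
            cases rest with
            | nil => simp at hlen2
            | cons yv rest' => exact ⟨yv, rest', rfl⟩
          have hget1 : PySem.List.pyGetD (op :: yv :: rest') 1 0 = yv := sss_pyGetD_one _ _ _
          have hyd : (op :: yv :: rest').getD 1 0 = yv := rfl
          rw [hyd] at hrange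
          have hsB : sssStepB m n (rows, cols, nr, nc, ans) (op :: yv :: rest')
              = (rows, PySem.Set.add cols (yv-1), nr, nc, ans) := by
            unfold sssStepB
            rw [hop, if_neg (by rw [h2]; norm_num), if_neg (by rw [h2]; norm_num), if_pos h2,
              hget1]
          rcases hrange with hzero | ⟨hb1, hb2⟩
          · -- n = 0: the matrix is empty, A's loop is a no-op; B's added column is
            -- irrelevant because sssMat is [] for n = 0
            have ha : a = [] := by
              rw [hA]
              simp [sssMat, PySem.List.pyRange_one_eq_nil (by omega : n ≤ (0:Int))]
            have hmat : ∀ cols' : List Int, sssMat m n rows cols' = [] := by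
              intro cols'
              simp [sssMat, PySem.List.pyRange_one_eq_nil (by omega : n ≤ (0:Int))]
            have hsA : sssStepA m n (a, ans) (op :: yv :: rest') = ([], ans) := by
              unfold sssStepA
              rw [hop, if_neg (by rw [h2]; norm_num), if_neg (by rw [h2]; norm_num), if_pos h2,
                ha]
              rfl
            rw [hsA, hsB]
            refine ih _ _ _ _ _ _ hq' ⟨(hmat _).symm,
              hndr, PySem.Set.nodup_add cols _ hndc, h0r, h0c, hbr,
              fun t ht1 ht2 => (PySem.Set.mem_add _ _ _).mpr (Or.inl (hbc t ht1 ht2))⟩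
          · have hm1 : 1 ≤ m := by omega
            have hsA : sssStepA m n (a, ans) (op :: yv :: rest')
                = (sssMat m n rows (PySem.Set.add cols (yv-1)), ans) := by
              unfold sssStepA
              rw [hop, if_neg (by rw [h2]; norm_num), if_neg (by rw [h2]; norm_num), if_pos h2, hA]
              rw [show (fun r => PySem.List.pySetD r (PySem.List.pyGetD (op :: yv :: rest') 1 0 - 1)
                ((n+n)*(m+m))) = (fun r => PySem.List.pySetD r (yv - 1) ((n+n)*(m+m))) from by
                  rw [hget1]]
              rw [sss_col_update m n rows cols yv hm1 hb1 hb2]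
            rw [hsA, hsB]
            refine ih _ _ _ _ _ _ hq' ⟨rfl, hndr, PySem.Set.nodup_add cols _ hndc, h0r, h0c,
              hbr, fun t ht1 ht2 => (PySem.Set.mem_add _ _ _).mpr (Or.inl (hbc t ht1 ht2))⟩
        · have hsA : sssStepA m n (a, ans) (op :: rest) = (a, ans) := by
            unfold sssStepA
            rw [hop, if_neg h0, if_neg h1, if_neg h2]
          have hsB : sssStepB m n (rows, cols, nr, nc, ans) (op :: rest)
              = (rows, cols, nr, nc, ans) := by
            unfold sssStepB
            rw [hop, if_neg h0, if_neg h1, if_neg h2]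
          rw [hsA, hsB]
          exact ih a rows cols nr nc ans hq' ⟨hA, hndr, hndc, h0r, h0c, hbr, hbc⟩

-- ===== VERDICT (by name: the statement is the Claim_ definition above) =====
theorem sss_spec : Claim_equal_sss := by
  unfold Claim_equal_sss
  intro m n q _ hpre
  unfold Spec_sss sss sss_alt
  exact sss_loop m n q _ PySem.Set.empty PySem.Set.empty 0 0 []
    (fun x hx => hpre x hx)
    ⟨(sss_init m n).symm ▸ rfl, List.nodup_nil, List.nodup_nil, le_refl 0, le_refl 0,
      fun t h1 h2 => absurd (lt_of_le_of_lt h1 h2) (lt_irrefl 0), fun t h1 h2 => absurd (lt_of_le_of_lt h1 h2) (lt_irrefl 0)⟩
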